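-- pv_equiv track=rewrite | github.com/yFaizuS/Hackerrank-Problem-Solving-Test | StringAnagram.py | stringAnagram
-- ===== SOURCE A (Python) =====
-- def stringAnagram(dictionary, query):
--     # Step 1: Create a dictionary to count sorted string occurrences
--     anagram_count = {}
--
--     for word in dictionary:
--         # Sort the word to create a key that represents all its anagrams
--         sorted_word = ''.join(sorted(word))
--         if sorted_word in anagram_count:
--             anagram_count[sorted_word] += 1
--         else:
--             anagram_count[sorted_word] = 1
--
--     # Step 2: For each query, find the count of its anagram in the dictionary
--     result = []
--     for q in query:
--         sorted_q = ''.join(sorted(q))  # Sort the query string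
--         result.append(anagram_count.get(sorted_q, 0))  # Append the count of anagrams
--
--     return result
-- ===== SOURCE B (Python) =====
-- def _bisect_left(a, x):
--     lo, hi = 0, len(a)
--     while lo < hi:
--         mid = (lo + hi) // 2
--         if a[mid] < x:
--             lo = mid + 1
--         else:
--             hi = mid
--     return lo
--
-- def _bisect_right(a, x):
--     lo, hi = 0, len(a)
--     while lo < hi:
--         mid = (lo + hi) // 2
--         if x < a[mid]:
--             hi = mid
--         else:
--             lo = mid + 1
--     return lo
--
-- def stringAnagram(dictionary, query):
--     sigs = sorted(''.join(sorted(w)) for w in dictionary)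
--     return [_bisect_right(sigs, k) - _bisect_left(sigs, k)
--             for k in (''.join(sorted(q)) for q in query)]
-- ===== Notes on version B (the rewrite author's own statement) =====
-- stated objective: alternative
-- what changed: Replaces A's hash frequency map by a sorted array of canonical signatures queried with hand-written bisect_left/bisect_right binary searches; each query's count is the difference of the two bisect positions.
import Mathlib
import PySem

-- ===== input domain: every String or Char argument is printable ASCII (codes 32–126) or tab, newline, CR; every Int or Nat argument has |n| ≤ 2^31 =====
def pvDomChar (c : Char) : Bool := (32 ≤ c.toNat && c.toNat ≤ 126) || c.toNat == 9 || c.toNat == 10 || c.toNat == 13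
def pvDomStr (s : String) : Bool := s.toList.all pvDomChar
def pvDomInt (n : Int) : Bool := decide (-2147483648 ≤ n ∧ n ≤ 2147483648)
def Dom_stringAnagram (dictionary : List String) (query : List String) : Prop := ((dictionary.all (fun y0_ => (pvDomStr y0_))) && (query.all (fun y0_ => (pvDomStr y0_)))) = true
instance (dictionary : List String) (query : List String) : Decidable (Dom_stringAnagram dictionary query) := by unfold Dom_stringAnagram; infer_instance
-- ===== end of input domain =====

-- B replaces A's hash frequency map by a sorted array of canonical signatures queried by hand-written binary searches (bisect_right - bisect_left); alternative algorithm, similar cost.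


-- ===== PORT A =====
-- ''.join(sorted(w)) : sort the characters (stable sort, identity key), rebuild the string
def pvSortKey (s : String) : String := String.ofList (PySem.List.sorted s.toList (fun c => c) false)

def stringAnagram (dictionary : List String) (query : List String) : List Int :=
  let anagram_count : PySem.Dict String Int :=
    dictionary.foldl (fun d word =>
      let sorted_word := pvSortKey word
      if d.contains sorted_word then d.insert sorted_word (d.getD sorted_word 0 + 1)
      else d.insert sorted_word 1) PySem.Dict.empty
  query.foldl (fun result q => result ++ [anagram_count.getD (pvSortKey q) 0]) []

-- ===== PORT B =====
-- Source B's hand-written _bisect_left/_bisect_right while loops ARE the fuel loops behind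
-- PySem.List.bisectLeft / bisectRight (same midpoint, same branch per comparison) — used as their port.
def stringAnagram_alt (dictionary : List String) (query : List String) : List Int :=
  let sigs := PySem.List.sorted (dictionary.map pvSortKey) (fun s => s) false
  (query.map pvSortKey).map (fun k =>
    ((PySem.List.bisectRight sigs k : Int) - (PySem.List.bisectLeft sigs k : Int)))

-- ===== PRECONDITION & SPEC =====
def Spec_stringAnagram (dictionary : List String) (query : List String) (out : List Int) : Prop := out = stringAnagram_alt dictionary query
instance (dictionary : List String) (query : List String) (out : List Int) : Decidable (Spec_stringAnagram dictionary query out) := by unfold Spec_stringAnagram; infer_instance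

-- ===== CLAIM (what is proved, stated in full; the proofs are below) =====
def Claim_equal_stringAnagram : Prop := ∀ (dictionary : List String) (query : List String), Dom_stringAnagram dictionary query → Spec_stringAnagram dictionary query (stringAnagram dictionary query)

-- ===== LEMMAS AND PROOFS =====

-- A's branching counter update is the unconditional 'insert k (getD k 0 + 1)' update
lemma stringAnagram_count_eq (dictionary : List String) :
    dictionary.foldl (fun d word =>
      let sorted_word := pvSortKey word
      if d.contains sorted_word then d.insert sorted_word (d.getD sorted_word 0 + 1)
      else d.insert sorted_word 1) (PySem.Dict.empty : PySem.Dict String Int)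
    = (dictionary.map pvSortKey).foldl
        (fun d k => d.insert k (d.getD k 0 + 1)) PySem.Dict.empty := by
  rw [List.foldl_map]
  apply PySem.List.foldl_congr_mem
  intro d w _
  by_cases h : d.contains (pvSortKey w) = true
  · simp [h]
  · have h0 : d.getD (pvSortKey w) 0 = 0 :=
      PySem.Dict.getD_of_not_contains d 0 (by simpa using h)
    simp [h, h0]

-- on a ≤-sorted list a downward-closed predicate holds exactly on the prefix of length countP
lemma sorted_countP_char (l : List String) (p : String → Bool)
    (hmono : ∀ y z : String, y ≤ z → p z = true → p y = true)
    (hsort : l.Pairwise (· ≤ ·)) :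
    ∀ j (hj : j < l.length), p l[j] = decide (j < l.countP p) := by
  induction l with
  | nil => intro j hj; simp at hj
  | cons a t ih =>
    have hst : t.Pairwise (· ≤ ·) := hsort.of_cons
    intro j hj
    by_cases ha : p a = true
    · cases j with
      | zero => simp [ha]
      | succ j =>
        have := ih hst j (by simpa using hj)
        simp [ha, this]
    · have hz : ∀ y ∈ t, p y = false := by
        intro y hy
        by_contra hc
        have : p y = true := by simpa using hc
        exact ha (hmono a y ((List.pairwise_cons.mp hsort).1 y hy) this)
      have hcz : t.countP p = 0 := by
        rw [List.countP_eq_zero]; intro y hy; simpa using hz y hy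
      cases j with
      | zero => simp [ha, hcz]
      | succ j =>
        have hj' : j < t.length := by simpa using hj
        simp [ha, hcz, hz t[j] (List.getElem_mem hj')]

-- the binary-search loop homes in on the prefix length b when the test characterises 'index < b'
lemma bisectLeftLoop_eq (xs : List String) (x : String) (b : Nat)
    (hchar : ∀ j (hj : j < xs.length), (decide (xs[j] < x)) = decide (j < b)) :
    ∀ fuel lo hi, hi - lo ≤ fuel → lo ≤ b → b ≤ hi → hi ≤ xs.length →
      PySem.List.bisectLeftLoop xs x fuel lo hi = b := by
  intro fuel
  induction fuel with
  | zero =>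
    intro lo hi h1 h2 h3 h4
    have : lo = b := by omega
    simpa [PySem.List.bisectLeftLoop] using this
  | succ fuel ih =>
    intro lo hi h1 h2 h3 h4
    by_cases hlt : lo < hi
    · have hmid : (lo + hi) / 2 < xs.length := by omega
      have hget : xs[(lo + hi) / 2]? = some xs[(lo + hi) / 2] :=
        List.getElem?_eq_getElem hmid
      by_cases hy : xs[(lo + hi) / 2] < x
      · have hb : (lo + hi) / 2 < b := by
          have := hchar ((lo + hi) / 2) hmid
          simp [hy] at this; omega
        simp only [PySem.List.bisectLeftLoop, hlt, if_pos, hget, hy]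
        exact ih ((lo + hi) / 2 + 1) hi (by omega) (by omega) h3 h4
      · have hb : b ≤ (lo + hi) / 2 := by
          have := hchar ((lo + hi) / 2) hmid
          simp [hy] at this; omega
        simp only [PySem.List.bisectLeftLoop, hlt, if_pos, hget, hy, if_false]
        exact ih lo ((lo + hi) / 2) (by omega) h2 hb (by omega)
    · have : lo = b := by omega
      simpa [PySem.List.bisectLeftLoop, hlt] using this

lemma bisectRightLoop_eq (xs : List String) (x : String) (b : Nat)
    (hchar : ∀ j (hj : j < xs.length), (decide (xs[j] ≤ x)) = decide (j < b)) :
    ∀ fuel lo hi, hi - lo ≤ fuel → lo ≤ b → b ≤ hi → hi ≤ xs.length →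
      PySem.List.bisectRightLoop xs x fuel lo hi = b := by
  intro fuel
  induction fuel with
  | zero =>
    intro lo hi h1 h2 h3 h4
    have : lo = b := by omega
    simpa [PySem.List.bisectRightLoop] using this
  | succ fuel ih =>
    intro lo hi h1 h2 h3 h4
    by_cases hlt : lo < hi
    · have hmid : (lo + hi) / 2 < xs.length := by omega
      have hget : xs[(lo + hi) / 2]? = some xs[(lo + hi) / 2] :=
        List.getElem?_eq_getElem hmid
      by_cases hy : x < xs[(lo + hi) / 2]
      · have hb : b ≤ (lo + hi) / 2 := by
          have := hchar ((lo + hi) / 2) hmid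
          have hle : ¬ xs[(lo + hi) / 2] ≤ x := not_le.mpr hy
          simp [hle] at this; omega
        simp only [PySem.List.bisectRightLoop, hlt, if_pos, hget, hy]
        exact ih lo ((lo + hi) / 2) (by omega) h2 hb (by omega)
      · have hb : (lo + hi) / 2 < b := by
          have := hchar ((lo + hi) / 2) hmid
          have hle : xs[(lo + hi) / 2] ≤ x := not_lt.mp hy
          simp [hle] at this; omega
        simp only [PySem.List.bisectRightLoop, hlt, if_pos, hget, hy, if_false]
        exact ih ((lo + hi) / 2 + 1) hi (by omega) (by omega) h3 h4
    · have : lo = b := by omega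
      simpa [PySem.List.bisectRightLoop, hlt] using this

lemma bisectLeft_count (xs : List String) (x : String) (hsort : xs.Pairwise (· ≤ ·)) :
    PySem.List.bisectLeft xs x = xs.countP (fun y => decide (y < x)) := by
  have hchar := sorted_countP_char xs (fun y => decide (y < x))
    (fun y z hyz hz => decide_eq_true (lt_of_le_of_lt hyz (of_decide_eq_true hz))) hsort
  exact bisectLeftLoop_eq xs x _ hchar xs.length 0 xs.length (by omega)
    (by omega) List.countP_le_length (le_refl _)

lemma bisectRight_count (xs : List String) (x : String) (hsort : xs.Pairwise (· ≤ ·)) :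
    PySem.List.bisectRight xs x = xs.countP (fun y => decide (y ≤ x)) := by
  have hchar := sorted_countP_char xs (fun y => decide (y ≤ x))
    (fun y z hyz hz => decide_eq_true (le_trans hyz (of_decide_eq_true hz))) hsort
  exact bisectRightLoop_eq xs x _ hchar xs.length 0 xs.length (by omega)
    (by omega) List.countP_le_length (le_refl _)

-- countP(≤ x) splits into countP(< x) plus the multiplicity of x (any list)
lemma countP_le_split (l : List String) (x : String) :
    l.countP (fun y => decide (y ≤ x))
      = l.countP (fun y => decide (y < x)) + l.count x := by
  induction l with
  | nil => simp
  | cons a t ih =>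
    rw [List.countP_cons, List.countP_cons, List.count_cons, ih]
    rcases lt_trichotomy a x with h | h | h
    · rw [if_pos (decide_eq_true (le_of_lt h)), if_pos (decide_eq_true h),
        if_neg (by simp [ne_of_lt h])]
      omega
    · subst h
      rw [if_pos (decide_eq_true (le_refl a)), if_neg (by simp), if_pos (by simp)]
      omega
    · rw [if_neg (by simp [not_le.mpr h]), if_neg (by simp [not_lt.mpr (le_of_lt h)]),
        if_neg (by simp; exact ne_of_gt h)]
      omega

-- ===== VERDICT (by name: the statement is the Claim_ definition above) =====
theorem stringAnagram_spec : Claim_equal_stringAnagram := by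
  intro dictionary query _
  unfold Spec_stringAnagram stringAnagram stringAnagram_alt
  rw [stringAnagram_count_eq]
  rw [PySem.List.foldl_append_singleton_eq_map]
  simp only [List.nil_append, List.map_map]
  apply List.map_congr_left
  intro q _
  rw [PySem.Dict.getD_foldl_insert_add_one, PySem.Dict.getD_empty]
  set sigs := PySem.List.sorted (dictionary.map pvSortKey) (fun s => s) false with hsigs
  have hsort : sigs.Pairwise (· ≤ ·) := PySem.List.sorted_pairwise _ _
  rw [Function.comp, bisectLeft_count _ _ hsort, bisectRight_count _ _ hsort,
    countP_le_split]
  have hperm : sigs.Perm (dictionary.map pvSortKey) := PySem.List.sorted_perm _ _ _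
  rw [hperm.count_eq]
  simp
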